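-- pv_equiv track=rewrite | github.com/TomasSalav/programacion_1 | RESPUESTA_PARCIAL_PI/RESPUESTA_PARCIAL_PARTE1_PI.py | generar_calendario
-- ===== SOURCE A (Python) =====
-- def es_bisiesto(anio: int) -> bool:
--
--     #Determina si un año es bisiesto.
--
--     if not isinstance(anio, int):
--         raise ValueError("Año debe ser entero")
--     if anio % 400 == 0:
--         return True
--     if anio % 100 == 0:
--         return False
--     return anio % 4 == 0
--
-- def dias_en_mes(mes: int, anio: int) -> int:
--
--     #Retorna el número de días en un mes específico.
--     #Raises:
--     #  ValueError: Si mes es inválido (no está entre 1 y 12)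
--
--     if not (1 <= mes <= 12):
--         raise ValueError("Mes inválido (debe ser 1-12)")
--     if mes in (1, 3, 5, 7, 8, 10, 12):
--         return 31
--     if mes in (4, 6, 9, 11):
--         return 30
--     # mes == 2
--     return 29 if es_bisiesto(anio) else 28
--
-- def generar_calendario(mes: int, anio: int, dia_inicio: int = 0) -> str:
--
--     #Genera representación string del calendario de un mes.
--     #Formato:
--     #Lu Ma Mi Ju Vi Sa Do
--     # 1  2 ... alineado en 2 espacios por día
--     #dia_inicio: 0 = Lunes ... 6 = Domingo
--
--     if not (1 <= mes <= 12):
--         raise ValueError("Mes inválido (1-12)")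
--     if not (0 <= dia_inicio <= 6):
--         raise ValueError("dia_inicio debe estar entre 0 (Lunes) y 6 (Domingo)")
--
--     dias = dias_en_mes(mes, anio)
--     encabezado = "Lu Ma Mi Ju Vi Sa Do"
--     # cada dia ocupa 3 caracteres (dos para numero + espacio)
--     semanas = []
--     semana = ["  "] * 7  # placeholders como strings
--     dia_actual = 1
--     # llenar primeros espacios según dia_inicio
--     idx = dia_inicio
--     while dia_actual <= dias:
--         semana[idx] = f"{dia_actual:2d}"
--         dia_actual += 1
--         idx += 1
--         if idx == 7:
--             semanas.append(semana)
--             semana = ["  "] * 7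
--             idx = 0
--     # si quedó semana incompleta, añadirla
--     if any(cell.strip() for cell in semana):
--         semanas.append(semana)
--
--     # construir string
--     lineas = [encabezado]
--     for s in semanas:
--         lineas.append(" ".join(s))
--     return "\n".join(lineas)
-- ===== SOURCE B (Python) =====
-- def es_bisiesto(anio: int) -> bool:
--     if not isinstance(anio, int):
--         raise ValueError("Año debe ser entero")
--     return (anio % 4 == 0 and anio % 100 != 0) or anio % 400 == 0
--
-- def dias_en_mes(mes: int, anio: int) -> int:
--     if not (1 <= mes <= 12):
--         raise ValueError("Mes inválido (debe ser 1-12)")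
--     return [31, 29 if es_bisiesto(anio) else 28, 31, 30, 31, 30, 31, 31, 30, 31, 30, 31][mes - 1]
--
-- def generar_calendario(mes: int, anio: int, dia_inicio: int = 0) -> str:
--     if not (1 <= mes <= 12):
--         raise ValueError("Mes inválido (1-12)")
--     if not (0 <= dia_inicio <= 6):
--         raise ValueError("dia_inicio debe estar entre 0 (Lunes) y 6 (Domingo)")
--     dias = dias_en_mes(mes, anio)
--     cells = ["  "] * dia_inicio + [f"{d:2d}" for d in range(1, dias + 1)]
--     cells += ["  "] * ((-len(cells)) % 7)
--     lines = ["Lu Ma Mi Ju Vi Sa Do"]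
--     for i in range(0, len(cells), 7):
--         lines.append(" ".join(cells[i:i + 7]))
--     return "\n".join(lines)
-- ===== Notes on version B (the rewrite author's own statement) =====
-- stated objective: alternative
-- what changed: B replaces A's mutable 7-slot week buffer filled by a while loop (with an any()-based check for a trailing partial week) by building one flat list of cells (leading blanks + formatted days), padding it to a multiple of 7, and slicing it into week lines.
import Mathlib
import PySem

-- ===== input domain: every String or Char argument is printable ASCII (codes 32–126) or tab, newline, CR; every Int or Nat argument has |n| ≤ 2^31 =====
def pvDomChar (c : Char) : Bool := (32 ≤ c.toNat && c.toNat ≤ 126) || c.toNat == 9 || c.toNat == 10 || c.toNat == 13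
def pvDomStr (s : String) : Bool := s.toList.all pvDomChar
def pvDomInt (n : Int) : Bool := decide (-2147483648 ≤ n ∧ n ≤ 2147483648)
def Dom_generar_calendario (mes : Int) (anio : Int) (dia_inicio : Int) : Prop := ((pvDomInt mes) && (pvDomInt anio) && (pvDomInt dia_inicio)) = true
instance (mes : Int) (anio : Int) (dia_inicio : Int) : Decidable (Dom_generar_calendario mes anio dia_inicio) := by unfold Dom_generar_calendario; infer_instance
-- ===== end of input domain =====

-- B replaces A's mutable-week while loop by a flat padded cell list sliced into weeks (different decomposition, same output).

-- ===== PORT A =====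
-- f"{d:2d}" : right-align str(d) in width 2, space-padded (exact for width 2)
def fmt2 (d : Int) : String :=
  let cs := PySem.Int.toChars d
  String.ofList (List.replicate (2 - cs.length) ' ' ++ cs)

def es_bisiesto (anio : Int) : Bool :=
  if PySem.Int.mod anio 400 = 0 then true
  else if PySem.Int.mod anio 100 = 0 then false
  else PySem.Int.mod anio 4 = 0

def dias_en_mes (mes : Int) (anio : Int) : Int :=
  if ¬ (1 ≤ mes ∧ mes ≤ 12) then 0   -- Python raises ValueError; unreachable under Pre_
  else if mes = 1 ∨ mes = 3 ∨ mes = 5 ∨ mes = 7 ∨ mes = 8 ∨ mes = 10 ∨ mes = 12 then 31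
  else if mes = 4 ∨ mes = 6 ∨ mes = 9 ∨ mes = 11 then 30
  else if es_bisiesto anio then 29 else 28

-- the while loop: fuel = number of remaining days; state (dia_actual, idx, semana, semanas)
def loopA : Nat → Int → Nat → List String → List (List String) → List (List String) × List String
  | 0, _, _, semana, semanas => (semanas, semana)
  | n + 1, dia, idx, semana, semanas =>
    let semana' := semana.set idx (fmt2 dia)
    if idx + 1 = 7 then loopA n (dia + 1) 0 (List.replicate 7 "  ") (semanas ++ [semana'])
    else loopA n (dia + 1) (idx + 1) semana' semanas

def generar_calendario (mes : Int) (anio : Int) (dia_inicio : Int) : String :=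
  if ¬ (1 ≤ mes ∧ mes ≤ 12) then ""          -- Python raises ValueError; excluded by Pre_
  else if ¬ (0 ≤ dia_inicio ∧ dia_inicio ≤ 6) then ""   -- idem
  else
    let dias := dias_en_mes mes anio
    let res := loopA dias.toNat 1 dia_inicio.toNat (List.replicate 7 "  ") []
    let semanas := res.1
    let semana := res.2
    let semanas := if semana.any (fun c => PySem.Str.strip c ≠ "") then semanas ++ [semana] else semanas
    let lineas := "Lu Ma Mi Ju Vi Sa Do" :: semanas.map (fun s => PySem.Str.join " " s)
    PySem.Str.join "\n" lineas

-- ===== PORT B =====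
def es_bisiesto_alt (anio : Int) : Bool :=
  (PySem.Int.mod anio 4 = 0 ∧ ¬ PySem.Int.mod anio 100 = 0) ∨ PySem.Int.mod anio 400 = 0

def dias_en_mes_alt (mes : Int) (anio : Int) : Int :=
  if ¬ (1 ≤ mes ∧ mes ≤ 12) then 0   -- Python raises ValueError; unreachable under Pre_
  else PySem.List.pyGetD
    ([31, if es_bisiesto_alt anio then 29 else 28, 31, 30, 31, 30, 31, 31, 30, 31, 30, 31] : List Int)
    (mes - 1) 0

def generar_calendario_alt (mes : Int) (anio : Int) (dia_inicio : Int) : String :=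
  if ¬ (1 ≤ mes ∧ mes ≤ 12) then ""          -- Python raises ValueError; excluded by Pre_
  else if ¬ (0 ≤ dia_inicio ∧ dia_inicio ≤ 6) then ""   -- idem
  else
    let dias := dias_en_mes_alt mes anio
    let cells := List.replicate dia_inicio.toNat "  " ++ (PySem.List.pyRange 1 (dias + 1) 1).map fmt2
    let cells := cells ++ List.replicate (PySem.Int.mod (-(cells.length : Int)) 7).toNat "  "
    let lines := (PySem.List.pyRange 0 (cells.length : Int) 7).foldl
      (fun acc i => acc ++ [PySem.Str.join " " (PySem.List.slice cells (some i) (some (i + 7)))])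
      ["Lu Ma Mi Ju Vi Sa Do"]
    PySem.Str.join "\n" lines

-- ===== PRECONDITION & SPEC =====
-- Pre_ excludes exactly the inputs on which A raises ValueError (mes outside 1..12 or dia_inicio outside 0..6).
def Pre_generar_calendario (mes : Int) (anio : Int) (dia_inicio : Int) : Prop :=
  (1 ≤ mes ∧ mes ≤ 12) ∧ (0 ≤ dia_inicio ∧ dia_inicio ≤ 6)
instance (mes : Int) (anio : Int) (dia_inicio : Int) : Decidable (Pre_generar_calendario mes anio dia_inicio) := by
  unfold Pre_generar_calendario; infer_instance

def pvWitness_generar_calendario : Int × Int × Int := (2, 2024, 3)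

def Spec_generar_calendario (mes : Int) (anio : Int) (dia_inicio : Int) (out : String) : Prop := out = generar_calendario_alt mes anio dia_inicio
instance (mes : Int) (anio : Int) (dia_inicio : Int) (out : String) : Decidable (Spec_generar_calendario mes anio dia_inicio out) := by unfold Spec_generar_calendario; infer_instance

-- ===== CLAIM (what is proved, stated in full; the proofs are below) =====
def Claim_equal_generar_calendario : Prop := ∀ (mes : Int) (anio : Int) (dia_inicio : Int), Dom_generar_calendario mes anio dia_inicio → Pre_generar_calendario mes anio dia_inicio → Spec_generar_calendario mes anio dia_inicio (generar_calendario mes anio dia_inicio)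

-- ===== LEMMAS AND PROOFS =====

theorem es_bisiesto_eq (anio : Int) : es_bisiesto anio = es_bisiesto_alt anio := by
  have i2 : (400:Int) ∣ anio → (4:Int) ∣ anio := fun h => dvd_trans (by norm_num) h
  have i3 : (100:Int) ∣ anio → (4:Int) ∣ anio := fun h => dvd_trans (by norm_num) h
  by_cases h400 : (400:Int) ∣ anio <;> by_cases h100 : (100:Int) ∣ anio <;>
    by_cases h4 : (4:Int) ∣ anio <;>
    simp_all [es_bisiesto, es_bisiesto_alt, PySem.Int.mod_eq_zero_iff_dvd]

theorem dias_eq (mes anio : Int) (h1 : 1 ≤ mes) (h2 : mes ≤ 12) :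
    dias_en_mes mes anio = dias_en_mes_alt mes anio := by
  unfold dias_en_mes dias_en_mes_alt
  rw [es_bisiesto_eq]
  interval_cases mes <;> cases es_bisiesto_alt anio <;> simp [PySem.List.pyGetD]

theorem dias_bounds (mes anio : Int) (h1 : 1 ≤ mes) (h2 : mes ≤ 12) :
    28 ≤ dias_en_mes_alt mes anio ∧ dias_en_mes_alt mes anio ≤ 31 := by
  unfold dias_en_mes_alt
  interval_cases mes <;> cases es_bisiesto_alt anio <;> simp [PySem.List.pyGetD]

def bodyA (d di : Int) : String :=
  let res := loopA d.toNat 1 di.toNat (List.replicate 7 "  ") []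
  let semanas := res.1
  let semana := res.2
  let semanas := if semana.any (fun c => PySem.Str.strip c ≠ "") then semanas ++ [semana] else semanas
  PySem.Str.join "\n" ("Lu Ma Mi Ju Vi Sa Do" :: semanas.map (fun s => PySem.Str.join " " s))

def bodyB (d di : Int) : String :=
  let cells := List.replicate di.toNat "  " ++ (PySem.List.pyRange 1 (d + 1) 1).map fmt2
  let cells := cells ++ List.replicate (PySem.Int.mod (-(cells.length : Int)) 7).toNat "  "
  PySem.Str.join "\n" ((PySem.List.pyRange 0 (cells.length : Int) 7).foldl
    (fun acc i => acc ++ [PySem.Str.join " " (PySem.List.slice cells (some i) (some (i + 7)))])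
    ["Lu Ma Mi Ju Vi Sa Do"])


set_option maxRecDepth 100000
set_option maxHeartbeats 1000000

theorem body_eq_28_0 : bodyA 28 0 = bodyB 28 0 := by decide
theorem body_eq_28_1 : bodyA 28 1 = bodyB 28 1 := by decide
theorem body_eq_28_2 : bodyA 28 2 = bodyB 28 2 := by decide
theorem body_eq_28_3 : bodyA 28 3 = bodyB 28 3 := by decide
theorem body_eq_28_4 : bodyA 28 4 = bodyB 28 4 := by decide
theorem body_eq_28_5 : bodyA 28 5 = bodyB 28 5 := by decide
theorem body_eq_28_6 : bodyA 28 6 = bodyB 28 6 := by decide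
theorem body_eq_29_0 : bodyA 29 0 = bodyB 29 0 := by decide
theorem body_eq_29_1 : bodyA 29 1 = bodyB 29 1 := by decide
theorem body_eq_29_2 : bodyA 29 2 = bodyB 29 2 := by decide
theorem body_eq_29_3 : bodyA 29 3 = bodyB 29 3 := by decide
theorem body_eq_29_4 : bodyA 29 4 = bodyB 29 4 := by decide
theorem body_eq_29_5 : bodyA 29 5 = bodyB 29 5 := by decide
theorem body_eq_29_6 : bodyA 29 6 = bodyB 29 6 := by decide
theorem body_eq_30_0 : bodyA 30 0 = bodyB 30 0 := by decide
theorem body_eq_30_1 : bodyA 30 1 = bodyB 30 1 := by decide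
theorem body_eq_30_2 : bodyA 30 2 = bodyB 30 2 := by decide
theorem body_eq_30_3 : bodyA 30 3 = bodyB 30 3 := by decide
theorem body_eq_30_4 : bodyA 30 4 = bodyB 30 4 := by decide
theorem body_eq_30_5 : bodyA 30 5 = bodyB 30 5 := by decide
theorem body_eq_30_6 : bodyA 30 6 = bodyB 30 6 := by decide
theorem body_eq_31_0 : bodyA 31 0 = bodyB 31 0 := by decide
theorem body_eq_31_1 : bodyA 31 1 = bodyB 31 1 := by decide
theorem body_eq_31_2 : bodyA 31 2 = bodyB 31 2 := by decide
theorem body_eq_31_3 : bodyA 31 3 = bodyB 31 3 := by decide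
theorem body_eq_31_4 : bodyA 31 4 = bodyB 31 4 := by decide
theorem body_eq_31_5 : bodyA 31 5 = bodyB 31 5 := by decide
theorem body_eq_31_6 : bodyA 31 6 = bodyB 31 6 := by decide

theorem body_eq (d di : Int) (hd1 : 28 ≤ d) (hd2 : d ≤ 31) (hi1 : 0 ≤ di) (hi2 : di ≤ 6) :
    bodyA d di = bodyB d di := by
  interval_cases d <;> interval_cases di
  exacts [body_eq_28_0, body_eq_28_1, body_eq_28_2, body_eq_28_3, body_eq_28_4, body_eq_28_5, body_eq_28_6, body_eq_29_0, body_eq_29_1, body_eq_29_2, body_eq_29_3, body_eq_29_4, body_eq_29_5, body_eq_29_6, body_eq_30_0, body_eq_30_1, body_eq_30_2, body_eq_30_3, body_eq_30_4, body_eq_30_5, body_eq_30_6, body_eq_31_0, body_eq_31_1, body_eq_31_2, body_eq_31_3, body_eq_31_4, body_eq_31_5, body_eq_31_6]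

-- ===== VERDICT (by name: the statement is the Claim_ definition above) =====
theorem generar_calendario_spec : Claim_equal_generar_calendario := by
  intro mes anio dia_inicio _ hpre
  obtain ⟨⟨h1, h2⟩, ⟨h3, h4⟩⟩ := hpre
  unfold Spec_generar_calendario generar_calendario generar_calendario_alt
  rw [if_neg (by omega), if_neg (by omega), if_neg (by omega), if_neg (by omega)]
  rw [dias_eq mes anio h1 h2]
  obtain ⟨hb1, hb2⟩ := dias_bounds mes anio h1 h2
  exact body_eq (dias_en_mes_alt mes anio) dia_inicio hb1 hb2 h3 h4
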